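-- pv_equiv track=rewrite | github.com/Ratty123/crimson-texture-forge | crimson_texture_forge/core/research.py | unknown_resolver_choice_for
-- ===== SOURCE A (Python) =====
-- from typing import Callable, Dict, Iterable, List, Optional, Sequence, Tuple
--
-- _UNKNOWN_RESOLVER_LABELS: Tuple[Tuple[str, str, str], ...] = (
--     ("color_albedo", "color", "albedo"),
--     ("color_variant", "color", "albedo_variant"),
--     ("ui", "ui", "ui"),
--     ("emissive", "emissive", "emissive"),
--     ("normal", "normal", "normal"),
--     ("roughness", "roughness", "roughness"),
--     ("height", "height", "displacement"),
--     ("mask_generic", "mask", "mask"),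
--     ("mask_specular", "mask", "specular"),
--     ("mask_opacity", "mask", "opacity_mask"),
--     ("vector", "vector", "vector"),
--     ("unknown", "unknown", "unknown"),
-- )
--
-- def default_unknown_resolver_label_choice() -> str:
--     return "color_albedo"
--
-- def unknown_resolver_choice_for(texture_type: str, semantic_subtype: str) -> str:
--     normalized_type = str(texture_type or "").strip().lower()
--     normalized_subtype = str(semantic_subtype or "").strip().lower()
--     for choice_key, choice_type, choice_subtype in _UNKNOWN_RESOLVER_LABELS:
--         if normalized_type == choice_type and normalized_subtype == choice_subtype:
--             return choice_key
--     for choice_key, choice_type, _choice_subtype in _UNKNOWN_RESOLVER_LABELS: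
--         if normalized_type == choice_type:
--             return choice_key
--     return default_unknown_resolver_label_choice()
-- ===== SOURCE B (Python) =====
-- _UNKNOWN_RESOLVER_LABELS = (
--     ("color_albedo", "color", "albedo"),
--     ("color_variant", "color", "albedo_variant"),
--     ("ui", "ui", "ui"),
--     ("emissive", "emissive", "emissive"),
--     ("normal", "normal", "normal"),
--     ("roughness", "roughness", "roughness"),
--     ("height", "height", "displacement"),
--     ("mask_generic", "mask", "mask"),
--     ("mask_specular", "mask", "specular"),
--     ("mask_opacity", "mask", "opacity_mask"),
--     ("vector", "vector", "vector"),
--     ("unknown", "unknown", "unknown"),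
-- )
--
-- def default_unknown_resolver_label_choice() -> str:
--     return "color_albedo"
--
-- def unknown_resolver_choice_for(texture_type: str, semantic_subtype: str) -> str:
--     # Single pass with a best-match accumulator: score 2 = exact (type, subtype)
--     # match (unique in the table, so we can stop), score 1 = type-only match
--     # (first one wins because we only upgrade on a strictly better score).
--     normalized_type = str(texture_type or "").strip().lower()
--     normalized_subtype = str(semantic_subtype or "").strip().lower()
--     best_key = default_unknown_resolver_label_choice()
--     best_score = 0
--     for key, choice_type, choice_subtype in _UNKNOWN_RESOLVER_LABELS:
--         if choice_type == normalized_type: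
--             score = 2 if choice_subtype == normalized_subtype else 1
--         else:
--             score = 0
--         if score > best_score:
--             best_key, best_score = key, score
--             if score == 2:
--                 break
--     return best_key
-- ===== Notes on version B (the rewrite author's own statement) =====
-- stated objective: alternative
-- what changed: Replaced A's two staged linear scans (exact pair, then type-only) with a single pass over the label table keeping a best-score accumulator (2 = exact pair with early exit, 1 = first type-only match, default otherwise).
import Mathlib
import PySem

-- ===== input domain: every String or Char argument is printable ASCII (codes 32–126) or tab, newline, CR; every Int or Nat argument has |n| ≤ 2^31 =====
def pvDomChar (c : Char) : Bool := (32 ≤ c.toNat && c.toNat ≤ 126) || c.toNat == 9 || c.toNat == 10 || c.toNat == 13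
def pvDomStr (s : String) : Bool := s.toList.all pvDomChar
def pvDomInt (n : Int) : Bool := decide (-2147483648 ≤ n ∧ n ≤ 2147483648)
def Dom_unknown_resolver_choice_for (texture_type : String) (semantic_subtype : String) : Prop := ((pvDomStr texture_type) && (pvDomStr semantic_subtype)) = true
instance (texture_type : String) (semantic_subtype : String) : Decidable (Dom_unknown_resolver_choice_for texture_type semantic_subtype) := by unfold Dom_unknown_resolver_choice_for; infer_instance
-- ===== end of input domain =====

-- B replaces A's two staged scans with a single pass carrying a best-score
-- accumulator (2 = exact pair, early exit; 1 = first type-only match) (objective: alternative).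

-- ===== PORT A =====
def pvLabels : List (String × String × String) :=
  [("color_albedo", "color", "albedo"),
   ("color_variant", "color", "albedo_variant"),
   ("ui", "ui", "ui"),
   ("emissive", "emissive", "emissive"),
   ("normal", "normal", "normal"),
   ("roughness", "roughness", "roughness"),
   ("height", "height", "displacement"),
   ("mask_generic", "mask", "mask"),
   ("mask_specular", "mask", "specular"),
   ("mask_opacity", "mask", "opacity_mask"),
   ("vector", "vector", "vector"),
   ("unknown", "unknown", "unknown")]

def pvDefaultChoice : String := "color_albedo"

-- first loop: match on both type and subtype
def pvScanBoth (nt ns : String) : List (String × String × String) → Option String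
  | [] => none
  | (k, t, s) :: rest => if nt = t ∧ ns = s then some k else pvScanBoth nt ns rest

-- second loop: match on type only
def pvScanType (nt : String) : List (String × String × String) → Option String
  | [] => none
  | (k, t, _) :: rest => if nt = t then some k else pvScanType nt rest

-- "return the loop's hit if any, else fall through"
def pvFirst (o : Option String) (fallback : String) : String :=
  match o with
  | some k => k
  | none => fallback

def unknown_resolver_choice_for (texture_type : String) (semantic_subtype : String) : String :=
  -- str(x or "") on a str argument: "" if x is empty, else x
  let normalized_type := PySem.Str.lower (PySem.Str.strip (if texture_type = "" then "" else texture_type))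
  let normalized_subtype := PySem.Str.lower (PySem.Str.strip (if semantic_subtype = "" then "" else semantic_subtype))
  pvFirst (pvScanBoth normalized_type normalized_subtype pvLabels)
    (pvFirst (pvScanType normalized_type pvLabels) pvDefaultChoice)

-- ===== PORT B =====
-- single pass with a best-score accumulator (bestKey, bestScore); score 2 breaks out of the loop
def pvBest (nt ns : String) : List (String × String × String) → String → Nat → String
  | [], bestKey, _ => bestKey
  | (k, t, s) :: rest, bestKey, bestScore =>
    let score : Nat := if t = nt then (if s = ns then 2 else 1) else 0
    if score > bestScore then
      if score = 2 then k else pvBest nt ns rest k score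
    else
      pvBest nt ns rest bestKey bestScore

def unknown_resolver_choice_for_alt (texture_type : String) (semantic_subtype : String) : String :=
  let normalized_type := PySem.Str.lower (PySem.Str.strip (if texture_type = "" then "" else texture_type))
  let normalized_subtype := PySem.Str.lower (PySem.Str.strip (if semantic_subtype = "" then "" else semantic_subtype))
  pvBest normalized_type normalized_subtype pvLabels pvDefaultChoice 0

-- ===== PRECONDITION & SPEC =====
def Spec_unknown_resolver_choice_for (texture_type : String) (semantic_subtype : String) (out : String) : Prop := out = unknown_resolver_choice_for_alt texture_type semantic_subtype
instance (texture_type : String) (semantic_subtype : String) (out : String) : Decidable (Spec_unknown_resolver_choice_for texture_type semantic_subtype out) := by unfold Spec_unknown_resolver_choice_for; infer_instance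

-- ===== CLAIM (what is proved, stated in full; the proofs are below) =====
def Claim_equal_unknown_resolver_choice_for : Prop := ∀ (texture_type : String) (semantic_subtype : String), Dom_unknown_resolver_choice_for texture_type semantic_subtype → Spec_unknown_resolver_choice_for texture_type semantic_subtype (unknown_resolver_choice_for texture_type semantic_subtype)

-- ===== LEMMAS AND PROOFS =====
-- once a type-only hit is held (score 1), only an exact pair can still win
theorem pvBest_one (nt ns : String) : ∀ (L : List (String × String × String)) (bk : String),
    pvBest nt ns L bk 1 = pvFirst (pvScanBoth nt ns L) bk := by
  intro L
  induction L with
  | nil => intro bk; rfl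
  | cons h rest ih =>
    intro bk
    obtain ⟨k, t, s⟩ := h
    simp only [pvBest, pvScanBoth]
    by_cases ht : t = nt
    · by_cases hs : s = ns
      · simp [ht, hs, pvFirst]
      · have hns : ¬ ns = s := fun h => hs h.symm
        simp [ht, hs, hns, ih]
    · have hne : ¬ nt = t := fun h1 => ht h1.symm
      simp [ht, hne, ih]

-- from score 0 the single pass equals A's two staged scans
theorem pvBest_zero (nt ns : String) : ∀ (L : List (String × String × String)) (bk : String),
    pvBest nt ns L bk 0 = pvFirst (pvScanBoth nt ns L) (pvFirst (pvScanType nt L) bk) := by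
  intro L
  induction L with
  | nil => intro bk; rfl
  | cons h rest ih =>
    intro bk
    obtain ⟨k, t, s⟩ := h
    simp only [pvBest, pvScanBoth, pvScanType]
    by_cases ht : t = nt
    · by_cases hs : s = ns
      · simp [ht, hs, pvFirst]
      · have hns : ¬ ns = s := fun h => hs h.symm
        simp [ht, hs, hns, pvBest_one, pvFirst]
    · have hne : ¬ nt = t := fun h1 => ht h1.symm
      simp [ht, hne, ih]

-- ===== VERDICT (by name: the statement is the Claim_ definition above) =====
theorem unknown_resolver_choice_for_spec : Claim_equal_unknown_resolver_choice_for := by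
  intro tt st _
  unfold Spec_unknown_resolver_choice_for unknown_resolver_choice_for unknown_resolver_choice_for_alt
  exact (pvBest_zero _ _ pvLabels pvDefaultChoice).symm
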